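-- pv_equiv track=rewrite | github.com/stigsec/Mab-Cipher | v1.1/mabcapi.py | modify_alphabet
-- ===== SOURCE A (Python) =====
-- def modify_alphabet(pwd1, alphabet):
--     alphabet_list = list(alphabet)
--     for char in pwd1:
--         if char in alphabet_list:
--             alphabet_list.remove(char)
--     modified_alphabet = ''.join(alphabet_list)
--     result = pwd1 + modified_alphabet
--     return result
-- ===== SOURCE B (Python) =====
-- def modify_alphabet(pwd1, alphabet):
--     need = {}
--     for char in pwd1:
--         need[char] = need.get(char, 0) + 1
--     kept = []
--     for char in alphabet:
--         if need.get(char, 0) > 0: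
--             need[char] = need[char] - 1
--         else:
--             kept.append(char)
--     return pwd1 + ''.join(kept)
-- ===== Notes on version B (the rewrite author's own statement) =====
-- stated objective: faster
-- what changed: Replaces A's loop over pwd1 with repeated list.remove scans of the alphabet by a frequency dict built from pwd1 plus a single filtering pass over alphabet.
import Mathlib
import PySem

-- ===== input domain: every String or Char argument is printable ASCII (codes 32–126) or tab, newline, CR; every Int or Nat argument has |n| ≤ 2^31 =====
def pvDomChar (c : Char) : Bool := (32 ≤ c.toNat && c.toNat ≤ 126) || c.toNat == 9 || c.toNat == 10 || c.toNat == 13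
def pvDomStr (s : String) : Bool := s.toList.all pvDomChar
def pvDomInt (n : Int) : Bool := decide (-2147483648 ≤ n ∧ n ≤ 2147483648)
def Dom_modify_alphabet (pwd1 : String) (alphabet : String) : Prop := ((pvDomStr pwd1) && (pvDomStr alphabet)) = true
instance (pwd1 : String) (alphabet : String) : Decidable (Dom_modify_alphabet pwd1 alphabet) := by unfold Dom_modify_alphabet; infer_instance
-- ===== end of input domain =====

-- B replaces A's per-pwd1-character `list.remove` scans by one frequency dict built from pwd1
-- and a single pass over alphabet (objective: faster, O(n+m) vs O(n·m)).

-- ===== PORT A =====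
def modify_alphabet (pwd1 : String) (alphabet : String) : String :=
  let alphabet_list := alphabet.toList
  let alphabet_list := pwd1.toList.foldl
    (fun acc char =>
      if acc.contains char then (PySem.List.remove? acc char).getD acc else acc)
    alphabet_list
  let modified_alphabet := String.ofList alphabet_list
  let result := pwd1 ++ modified_alphabet
  result

-- ===== PORT B =====
def modify_alphabet_alt (pwd1 : String) (alphabet : String) : String :=
  let need : PySem.Dict Char Int :=
    pwd1.toList.foldl (fun d c => d.insert c (d.getD c 0 + 1)) PySem.Dict.empty
  let final := alphabet.toList.foldl
    (fun (st : PySem.Dict Char Int × List Char) c =>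
      if st.1.getD c 0 > 0 then (st.1.insert c (st.1.getD c 0 - 1), st.2)
      else (st.1, st.2 ++ [c]))
    (need, [])
  pwd1 ++ String.ofList final.2

-- ===== PRECONDITION & SPEC =====
def Spec_modify_alphabet (pwd1 : String) (alphabet : String) (out : String) : Prop := out = modify_alphabet_alt pwd1 alphabet
instance (pwd1 : String) (alphabet : String) (out : String) : Decidable (Spec_modify_alphabet pwd1 alphabet out) := by unfold Spec_modify_alphabet; infer_instance

-- ===== CLAIM (what is proved, stated in full; the proofs are below) =====
def Claim_equal_modify_alphabet : Prop := ∀ (pwd1 : String) (alphabet : String), Dom_modify_alphabet pwd1 alphabet → Spec_modify_alphabet pwd1 alphabet (modify_alphabet pwd1 alphabet)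

-- ===== LEMMAS AND PROOFS =====

-- A's guarded remove step is exactly List.erase.
theorem pvStepA_eq_erase (acc : List Char) (c : Char) :
    (if acc.contains c then (PySem.List.remove? acc c).getD acc else acc) = acc.erase c := by
  by_cases h : c ∈ acc
  · rw [PySem.List.remove?_eq_some_erase acc c h]
    simp [h]
  · simp [h, List.erase_of_not_mem h]

-- A's loop over pwd1 computes alphabet.diff pwd1.
theorem pvFoldA_eq_diff (p l : List Char) :
    p.foldl (fun acc char =>
      if acc.contains char then (PySem.List.remove? acc char).getD acc else acc) l = l.diff p := by
  rw [List.diff_eq_foldl]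
  simp only [pvStepA_eq_erase]

-- Pure model of B's alphabet pass: the dict enters only through its lookup function.
def pvKeep (f : Char → Int) : List Char → List Char
  | [] => []
  | c :: l =>
      if f c > 0 then pvKeep (fun x => if x = c then f c - 1 else f x) l
      else c :: pvKeep f l

theorem pvFoldB_eq_keep (l : List Char) (d : PySem.Dict Char Int) (acc : List Char)
    (f : Char → Int) (hf : ∀ c, d.getD c 0 = f c) :
    (l.foldl
      (fun (st : PySem.Dict Char Int × List Char) c =>
        if st.1.getD c 0 > 0 then (st.1.insert c (st.1.getD c 0 - 1), st.2)
        else (st.1, st.2 ++ [c]))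
      (d, acc)).2 = acc ++ pvKeep f l := by
  induction l generalizing d acc f with
  | nil => simp [pvKeep]
  | cons c l ih =>
      simp only [List.foldl_cons, pvKeep, hf c]
      by_cases h : f c > 0
      · simp only [h, if_pos]
        exact ih _ _ _ (by
          intro x
          by_cases hx : x = c
          · simp [hx, PySem.Dict.getD_insert_self]
          · rw [PySem.Dict.getD_insert_of_ne _ _ _ hx, hf x]; simp [hx])
      · simp only [h, if_neg, not_false_iff]
        rw [ih _ _ f hf, List.append_assoc, List.singleton_append]

-- With counts taken from p, B's pass computes l.diff p.
theorem pvKeep_count (l : List Char) (p : List Char) :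
    pvKeep (fun c => (p.count c : Int)) l = l.diff p := by
  induction l generalizing p with
  | nil => simp [pvKeep]
  | cons c l ih =>
      by_cases h : c ∈ p
      · have hc : 0 < p.count c := List.count_pos_iff.mpr h
        have hpos : ((p.count c : Int)) > 0 := by exact_mod_cast hc
        have hfun : (fun x => if x = c then (p.count c : Int) - 1 else (p.count x : Int))
            = (fun x => ((p.erase c).count x : Int)) := by
          funext x
          by_cases hx : x = c
          · subst hx
            simp [List.count_erase_self]
            omega
          · simp [hx, List.count_erase_of_ne hx]
        rw [pvKeep, if_pos hpos, hfun, ih, List.cons_diff_of_mem h]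
      · have hc : p.count c = 0 := List.count_eq_zero.mpr h
        rw [pvKeep, if_neg (by simp [hc]), ih, List.cons_diff_of_not_mem h]

-- B's need-dict looks up p's multiplicities.
theorem pvNeed_getD (p : List Char) (c : Char) :
    (p.foldl (fun d c => d.insert c (d.getD c 0 + 1)) PySem.Dict.empty).getD c 0
      = (p.count c : Int) := by
  rw [PySem.Dict.foldl_insert_getD_add_one_eq_counter]
  exact PySem.Dict.getD_counter p c

-- ===== VERDICT (by name: the statement is the Claim_ definition above) =====
-- The two list-level computations agree.
theorem pvLists_eq (p l : List Char) :
    p.foldl (fun acc char =>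
      if acc.contains char then (PySem.List.remove? acc char).getD acc else acc) l
      = (l.foldl
          (fun (st : PySem.Dict Char Int × List Char) c =>
            if st.1.getD c 0 > 0 then (st.1.insert c (st.1.getD c 0 - 1), st.2)
            else (st.1, st.2 ++ [c]))
          (p.foldl (fun d c => d.insert c (d.getD c 0 + 1)) PySem.Dict.empty, [])).2 := by
  rw [pvFoldB_eq_keep _ _ _ (fun c => (p.count c : Int)) (pvNeed_getD p),
    pvKeep_count, pvFoldA_eq_diff]
  rfl

theorem modify_alphabet_spec : Claim_equal_modify_alphabet := by
  intro pwd1 alphabet _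
  exact congrArg (fun x => pwd1 ++ String.ofList x) (pvLists_eq pwd1.toList alphabet.toList)
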